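-- pv_equiv track=rewrite | github.com/sanghee-dev/Coding-Test | 프로그래머스/[Level 1] 체육복.py | solution
-- ===== SOURCE A (Python) =====
-- def solution(n, lost, reserve):
--     new_lost = [x for x in lost if x not in reserve]
--     new_reserve = sorted([x for x in reserve if x not in lost])
--
--     for i in new_reserve:
--         if i-1 in new_lost:
--             new_lost.remove(i-1)
--         elif i+1 in new_lost:
--             new_lost.remove(i+1)
--
--     return n-len(new_lost)
-- ===== SOURCE B (Python) =====
-- def solution(n, lost, reserve):
--     # Two-pointer merge over the two sorted filtered lists instead of A's
--     # mutable-list greedy with membership/remove scans.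
--     res_set = set(reserve)
--     lost_set = set(lost)
--     L = sorted(x for x in lost if x not in res_set)
--     R = sorted(x for x in reserve if x not in lost_set)
--     i = j = 0
--     unmatched = 0
--     while i < len(L) and j < len(R):
--         if R[j] + 1 < L[i]:
--             j += 1          # this reserve is too small to help any remaining lost
--         elif L[i] + 1 < R[j]:
--             unmatched += 1  # this lost student can no longer be helped
--             i += 1
--         else:               # adjacent values (the two lists are value-disjoint): lend
--             i += 1
--             j += 1
--     unmatched += len(L) - i
--     return n - unmatched
-- ===== Notes on version B (the rewrite author's own statement) =====
-- stated objective: faster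
-- what changed: B replaces A's per-reserve greedy over a mutable lost list (linear membership tests and remove() scans) by sorting both filtered lists once and running a single two-pointer merge that counts the lost students that can never be matched, using precomputed sets for the initial filters.
import Mathlib
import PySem

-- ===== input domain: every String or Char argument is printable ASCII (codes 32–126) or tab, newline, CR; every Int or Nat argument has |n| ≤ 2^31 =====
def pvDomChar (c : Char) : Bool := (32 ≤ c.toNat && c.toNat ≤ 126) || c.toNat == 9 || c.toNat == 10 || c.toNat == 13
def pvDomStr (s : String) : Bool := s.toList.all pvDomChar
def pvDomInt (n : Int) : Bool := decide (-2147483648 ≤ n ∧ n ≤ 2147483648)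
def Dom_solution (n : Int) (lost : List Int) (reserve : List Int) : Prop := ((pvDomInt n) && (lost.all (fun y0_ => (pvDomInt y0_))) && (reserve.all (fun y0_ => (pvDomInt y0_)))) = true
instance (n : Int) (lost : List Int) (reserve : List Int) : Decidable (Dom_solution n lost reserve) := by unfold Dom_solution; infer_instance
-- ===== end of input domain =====

-- B sorts both filtered lists once and counts unmatchable lost students in one
-- two-pointer merge instead of A's greedy with a mutable list (objective: faster).

-- ===== PORT A =====
-- one iteration of A's for-loop over the mutable new_lost list
def aStep (nl : List Int) (i : Int) : List Int :=
  if nl.contains (i - 1) then (PySem.List.remove? nl (i - 1)).getD nl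
  else if nl.contains (i + 1) then (PySem.List.remove? nl (i + 1)).getD nl
  else nl

-- literal transliteration of A: new_lost list, greedy remove over sorted new_reserve
def solution (n : Int) (lost : List Int) (reserve : List Int) : Int :=
  let newLost := lost.filter (fun x => !(reserve.contains x))
  let newReserve := PySem.List.sorted (reserve.filter (fun x => !(lost.contains x))) (fun x => x) false
  let finalLost := newReserve.foldl aStep newLost
  n - (finalLost.length : Int)

-- ===== PORT B =====
-- Source B's while loop: the two index pointers become the two list suffixes
def tpUnmatched : List Int → List Int → Int
  | ls, [] => (ls.length : Int)          -- loop exits; trailing `unmatched += len(L) - i`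
  | [], _ :: _ => 0
  | l :: ls, r :: rs =>
    if r + 1 < l then tpUnmatched (l :: ls) rs
    else if l + 1 < r then 1 + tpUnmatched ls (r :: rs)
    else tpUnmatched ls rs
  termination_by ls rs => ls.length + rs.length

-- literal transliteration of B (Source B): sort both filtered lists, two-pointer merge
def solution_alt (n : Int) (lost : List Int) (reserve : List Int) : Int :=
  let resSet := PySem.Set.ofList reserve
  let lostSet := PySem.Set.ofList lost
  let L := PySem.List.sorted (lost.filter (fun x => !(PySem.Set.contains resSet x))) (fun x => x) false
  let R := PySem.List.sorted (reserve.filter (fun x => !(PySem.Set.contains lostSet x))) (fun x => x) false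
  n - tpUnmatched L R

-- ===== PRECONDITION & SPEC =====
def Spec_solution (n : Int) (lost : List Int) (reserve : List Int) (out : Int) : Prop := out = solution_alt n lost reserve
instance (n : Int) (lost : List Int) (reserve : List Int) (out : Int) : Decidable (Spec_solution n lost reserve out) := by unfold Spec_solution; infer_instance

-- ===== CLAIM (what is proved, stated in full; the proofs are below) =====
def Claim_equal_solution : Prop := ∀ (n : Int) (lost : List Int) (reserve : List Int), Dom_solution n lost reserve → Spec_solution n lost reserve (solution n lost reserve)

-- ===== LEMMAS AND PROOFS =====

theorem headmin_of_pairwise {l : Int} {ls : List Int} (h : (l :: ls).Pairwise (· ≤ ·)) :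
    ∀ x ∈ l :: ls, l ≤ x := by
  intro x hx
  rcases List.mem_cons.mp hx with rfl | hx
  · exact le_refl x
  · exact (List.pairwise_cons.mp h).1 x hx

theorem count_zero_of_lt_head {l v : Int} {ls : List Int}
    (h : (l :: ls).Pairwise (· ≤ ·)) (hv : v < l) : (l :: ls).count v = 0 :=
  List.count_eq_zero.mpr (fun hm => absurd (headmin_of_pairwise h v hm) (by omega))

theorem notMem_of_count_zero {v : Int} {nl : List Int} (h : nl.count v = 0) :
    nl.contains v = false := by
  simp only [List.contains_eq_mem, decide_eq_false_iff_not]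
  exact List.count_eq_zero.mp h

-- MAIN INVARIANT: A's remaining lost list nl splits (as a multiset) into a list S of
-- already-dead values (below every remaining reserve minus one) and the sorted
-- suffix L that the two-pointer is still scanning; the final length of A's fold
-- then equals |S| plus the unmatched count the two-pointer reports on (L, R).
theorem tp_main (k : Nat) : ∀ (R L S nl : List Int),
    L.length + R.length ≤ k →
    R.Pairwise (· ≤ ·) → L.Pairwise (· ≤ ·) →
    (∀ v, nl.count v = S.count v + L.count v) →
    nl.length = S.length + L.length →
    (∀ s ∈ S, ∀ r ∈ R, s + 1 < r) →
    (∀ r ∈ R, nl.count r = 0) →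
    ((R.foldl aStep nl).length : Int) = (S.length : Int) + tpUnmatched L R := by
  induction k with
  | zero =>
    intro R L S nl hk hR hL hcnt hlen hdead hdisj
    have hR0 : R = [] := List.eq_nil_of_length_eq_zero (by omega)
    have hL0 : L = [] := List.eq_nil_of_length_eq_zero (by omega)
    subst hR0; subst hL0
    simp only [List.foldl_nil, tpUnmatched]
    simp [hlen]
  | succ k ih =>
    intro R L S nl hk hR hL hcnt hlen hdead hdisj
    match R, L with
    | [], L =>
      simp only [List.foldl_nil, tpUnmatched]
      push_cast [hlen]; ring
    | r :: rs, [] =>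
      -- neither r-1 nor r+1 can be in nl: nl's values are all dead (in S)
      have hS1 : S.count (r - 1) = 0 :=
        List.count_eq_zero.mpr (fun hm => by have := hdead _ hm r (by simp); omega)
      have hS2 : S.count (r + 1) = 0 :=
        List.count_eq_zero.mpr (fun hm => by have := hdead _ hm r (by simp); omega)
      have h1 : nl.count (r - 1) = 0 := by have := hcnt (r - 1); simp at this; omega
      have h2 : nl.count (r + 1) = 0 := by have := hcnt (r + 1); simp at this; omega
      have hstep : aStep nl r = nl := by
        unfold aStep; rw [notMem_of_count_zero h1, notMem_of_count_zero h2]; simp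
      rw [List.foldl_cons, hstep]
      have := ih rs [] S nl (by simp at hk ⊢; omega) (List.pairwise_cons.mp hR).2 hL hcnt hlen
        (fun s hs r' hr' => hdead s hs r' (List.mem_cons_of_mem r hr'))
        (fun r' hr' => hdisj r' (List.mem_cons_of_mem r hr'))
      rw [this]
      cases rs <;> simp [tpUnmatched]
    | r :: rs, l :: ls =>
      have hrrest : ∀ x ∈ rs, r ≤ x := (List.pairwise_cons.mp hR).1
      have hRs : rs.Pairwise (· ≤ ·) := (List.pairwise_cons.mp hR).2
      have hLs : ls.Pairwise (· ≤ ·) := (List.pairwise_cons.mp hL).2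
      have hS1 : S.count (r - 1) = 0 :=
        List.count_eq_zero.mpr (fun hm => by have := hdead _ hm r (by simp); omega)
      have hS2 : S.count (r + 1) = 0 :=
        List.count_eq_zero.mpr (fun hm => by have := hdead _ hm r (by simp); omega)
      by_cases hb1 : r + 1 < l
      · -- reserve r too small for every remaining lost: A's step is a no-op
        have hL1 : (l :: ls).count (r - 1) = 0 := count_zero_of_lt_head hL (by omega)
        have hL2 : (l :: ls).count (r + 1) = 0 := count_zero_of_lt_head hL (by omega)
        have h1 : nl.count (r - 1) = 0 := by have := hcnt (r - 1); omega
        have h2 : nl.count (r + 1) = 0 := by have := hcnt (r + 1); omega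
        have hstep : aStep nl r = nl := by
          unfold aStep; rw [notMem_of_count_zero h1, notMem_of_count_zero h2]; simp
        rw [List.foldl_cons, hstep]
        have := ih rs (l :: ls) S nl (by simp at hk ⊢; omega) hRs hL hcnt hlen
          (fun s hs r' hr' => hdead s hs r' (List.mem_cons_of_mem r hr'))
          (fun r' hr' => hdisj r' (List.mem_cons_of_mem r hr'))
        rw [this]
        rw [show tpUnmatched (l :: ls) (r :: rs) = tpUnmatched (l :: ls) rs by
          rw [tpUnmatched]; rw [if_pos hb1]]
      · by_cases hb2 : l + 1 < r
        · -- lost l can never be helped any more: move it from L to the dead list S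
          have hcnt' : ∀ v, nl.count v = (S ++ [l]).count v + ls.count v := by
            intro v
            have h := hcnt v
            rw [List.count_cons] at h
            rw [List.count_append, List.count_cons, List.count_nil]
            by_cases hv : v = l <;> simp [hv] at h ⊢ <;> omega
          have hlen' : nl.length = (S ++ [l]).length + ls.length := by
            simp at hlen ⊢; omega
          have hdead' : ∀ s ∈ S ++ [l], ∀ r' ∈ r :: rs, s + 1 < r' := by
            intro s hs r' hr'
            rcases List.mem_append.mp hs with hs | hs
            · exact hdead s hs r' hr'
            · have hsl : s = l := by simpa using hs
              subst hsl
              rcases List.mem_cons.mp hr' with rfl | hr'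
              · omega
              · have := hrrest r' hr'; omega
          have hstep := ih (r :: rs) ls (S ++ [l]) nl (by simp at hk ⊢; omega) hR hLs
            hcnt' hlen' hdead' hdisj
          rw [hstep]
          rw [show tpUnmatched (l :: ls) (r :: rs) = 1 + tpUnmatched ls (r :: rs) by
            rw [tpUnmatched]; rw [if_neg hb1, if_pos hb2]]
          simp only [List.length_append, List.length_singleton]
          push_cast
          ring
        · -- adjacent: l = r - 1 or l = r + 1; A removes one copy of l
          have hlnl : 0 < nl.count l := by
            have := hcnt l
            rw [List.count_cons_self] at this
            omega
          have hlr : l ≠ r := by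
            intro h; subst h; have := hdisj l (by simp); omega
          have hmem : l ∈ nl := List.count_pos_iff.mp hlnl
          have hstepA : aStep nl r = nl.erase l := by
            rcases (by omega : l = r - 1 ∨ l = r + 1) with hl | hl
            · unfold aStep
              have hc : nl.contains (r - 1) = true := by
                simp only [List.contains_eq_mem, decide_eq_true_eq]; rw [← hl]; exact hmem
              rw [hc]
              rw [← hl]
              simp [PySem.List.remove?_eq_some_erase nl l hmem]
            · unfold aStep
              have hL1 : (l :: ls).count (r - 1) = 0 := count_zero_of_lt_head hL (by omega)
              have h1 : nl.count (r - 1) = 0 := by have := hcnt (r - 1); omega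
              have hc2 : nl.contains (r + 1) = true := by
                simp only [List.contains_eq_mem, decide_eq_true_eq]; rw [← hl]; exact hmem
              rw [notMem_of_count_zero h1, hc2]
              rw [← hl]
              simp [PySem.List.remove?_eq_some_erase nl l hmem]
          rw [List.foldl_cons, hstepA]
          have hcnt' : ∀ v, (nl.erase l).count v = S.count v + ls.count v := by
            intro v
            have h := hcnt v
            rw [List.count_cons] at h
            by_cases hv : v = l
            · subst hv
              rw [List.count_erase_self]
              simp at h ⊢
              omega
            · rw [List.count_erase_of_ne hv]
              have hne : (l == v) = false := beq_eq_false_iff_ne.mpr (fun hh => hv hh.symm)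
              simp only [hne, Bool.false_eq_true, if_false] at h
              omega
          have hlen' : (nl.erase l).length = S.length + ls.length := by
            rw [List.length_erase_of_mem hmem]
            simp at hlen ⊢; omega
          have hdisj' : ∀ r' ∈ rs, (nl.erase l).count r' = 0 := by
            intro r' hr'
            have h0 := hdisj r' (List.mem_cons_of_mem r hr')
            by_cases hv : r' = l
            · subst hv; omega
            · rw [List.count_erase_of_ne hv]; exact h0
          have := ih rs ls S (nl.erase l) (by simp at hk ⊢; omega) hRs hLs
            hcnt' hlen'
            (fun s hs r' hr' => hdead s hs r' (List.mem_cons_of_mem r hr'))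
            hdisj'
          rw [this]
          rw [show tpUnmatched (l :: ls) (r :: rs) = tpUnmatched ls rs by
            rw [tpUnmatched]; rw [if_neg hb1, if_neg hb2]]

theorem contains_ofList (xs : List Int) (x : Int) :
    List.contains (PySem.Set.ofList xs) x = xs.contains x := by
  by_cases h : x ∈ xs <;> simp [h, PySem.Set.mem_ofList]

-- ===== VERDICT (by name: the statement is the Claim_ definition above) =====
theorem solution_spec : Claim_equal_solution := by
  intro n lost reserve _
  unfold Spec_solution
  simp only [solution, solution_alt]
  have hfR : (reserve.filter (fun x => !(PySem.Set.contains (PySem.Set.ofList lost) x)))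
      = reserve.filter (fun x => !(lost.contains x)) :=
    List.filter_congr (fun x _ => by
      rw [PySem.Set.contains_eq_listContains, contains_ofList])
  have hfL : (lost.filter (fun x => !(PySem.Set.contains (PySem.Set.ofList reserve) x)))
      = lost.filter (fun x => !(reserve.contains x)) :=
    List.filter_congr (fun x _ => by
      rw [PySem.Set.contains_eq_listContains, contains_ofList])
  rw [hfR, hfL]
  have hperm : (PySem.List.sorted (lost.filter (fun x => !(reserve.contains x))) (fun x => x) false).Perm
      (lost.filter (fun x => !(reserve.contains x))) := PySem.List.sorted_perm ..
  have hmain := tp_main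
    ((PySem.List.sorted (lost.filter (fun x => !(reserve.contains x))) (fun x => x) false).length
      + (PySem.List.sorted (reserve.filter (fun x => !(lost.contains x))) (fun x => x) false).length)
    (PySem.List.sorted (reserve.filter (fun x => !(lost.contains x))) (fun x => x) false)
    (PySem.List.sorted (lost.filter (fun x => !(reserve.contains x))) (fun x => x) false)
    [] (lost.filter (fun x => !(reserve.contains x)))
    (le_refl _)
    (PySem.List.sorted_pairwise _ _)
    (PySem.List.sorted_pairwise _ _)
    (fun v => by
      have := hperm.count_eq v
      simp only [List.count_nil]
      omega)
    (by
      simp only [List.length_nil, Nat.zero_add]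
      exact hperm.length_eq.symm)
    (by simp)
    (fun r hr => by
      have hr' := (PySem.List.mem_sorted _ _ _ _).mp hr
      have hrres : r ∈ reserve := (List.mem_filter.mp hr').1
      apply List.count_eq_zero.mpr
      intro hm
      have := (List.mem_filter.mp hm).2
      simp [List.contains_eq_mem, hrres] at this)
  rw [hmain]
  simp
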